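-- pv_equiv track=rewrite | github.com/saptarshiroy39/Cipher | backend/app/routers/permute/attack.py | pat
-- ===== SOURCE A (Python) =====
-- def pat(w):
--     m = {}
--     p = []
--     i = 0
--     for c in w:
--         if c not in m:
--             m[c] = str(i)
--             i += 1
--         p.append(m[c])
--     return "".join(p)
-- ===== SOURCE B (Python) =====
-- def pat(w):
--     # rank of c = number of distinct characters in the prefix of w ending at
--     # c's first occurrence, minus one; no running map/counter is maintained
--     return "".join(str(len(set(w[:w.index(c) + 1])) - 1) for c in w)
-- ===== Notes on version B (the rewrite author's own statement) =====
-- stated objective: alternative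
-- what changed: Replaces the stateful scan (dict + counter built while emitting) by a stateless per-character formula: each character's index is computed as the number of distinct characters in the prefix up to its first occurrence, minus one, via w.index and set of a slice.
import Mathlib
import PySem

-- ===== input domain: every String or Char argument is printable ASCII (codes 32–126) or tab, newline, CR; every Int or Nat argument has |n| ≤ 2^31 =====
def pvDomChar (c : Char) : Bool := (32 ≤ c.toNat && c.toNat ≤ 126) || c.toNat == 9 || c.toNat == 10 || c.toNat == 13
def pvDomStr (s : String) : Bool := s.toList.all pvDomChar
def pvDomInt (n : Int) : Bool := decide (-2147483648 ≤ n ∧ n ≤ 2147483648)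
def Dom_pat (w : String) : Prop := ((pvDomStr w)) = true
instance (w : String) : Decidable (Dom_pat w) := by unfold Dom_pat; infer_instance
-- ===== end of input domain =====

-- B drops A's stateful scan (running dict + counter) and computes each character's
-- index statelessly as (number of distinct characters in the prefix up to its first
-- occurrence) - 1; same results, different algorithm (objective: alternative).


-- ===== PORT A =====
-- single scan: dict m, output list p, counter i, updated per character (loop body as a helper)
def patStep (s : PySem.Dict Char String × List String × Int) (c : Char) :
    PySem.Dict Char String × List String × Int :=
  let mi := if s.1.contains c then (s.1, s.2.2)
            else (s.1.insert c (PySem.Int.toStr s.2.2), s.2.2 + 1)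
  (mi.1, s.2.1 ++ [mi.1.getD c ""], mi.2)

def pat (w : String) : String :=
  let r := w.toList.foldl patStep (PySem.Dict.empty, [], 0)
  PySem.Str.join "" r.2.1

-- ===== PORT B =====
-- "".join(str(len(set(w[:w.index(c) + 1])) - 1) for c in w)
-- w.index(c) is ported as idxOf on the character list (c is always present, so no
-- ValueError arises); w[:k+1] with k+1 ≥ 0 is List.take; set(...) is PySem.Set.ofList.
def pat_alt (w : String) : String :=
  PySem.Str.join "" (w.toList.map (fun c =>
    PySem.Int.toStr (((PySem.Set.ofList (w.toList.take (w.toList.idxOf c + 1))).length : Int) - 1)))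

-- ===== PRECONDITION & SPEC =====
def Spec_pat (w : String) (out : String) : Prop := out = pat_alt w
instance (w : String) (out : String) : Decidable (Spec_pat w out) := by unfold Spec_pat; infer_instance

-- ===== CLAIM (what is proved, stated in full; the proofs are below) =====
def Claim_equal_pat : Prop := ∀ (w : String), Dom_pat w → Spec_pat w (pat w)

-- ===== LEMMAS AND PROOFS =====

-- the index dict A has built after consuming the unique characters `u`, seed `d`, counter start `s`
def orderAux (s : Int) (u : List Char) (d : PySem.Dict Char String) : PySem.Dict Char String :=
  (PySem.List.enumerate u s).foldl
    (fun (d : PySem.Dict Char String) ic => d.insert ic.2 (PySem.Int.toStr ic.1)) d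

theorem orderAux_nil (s : Int) (d : PySem.Dict Char String) : orderAux s [] d = d := rfl

theorem orderAux_cons (s : Int) (x : Char) (u : List Char) (d : PySem.Dict Char String) :
    orderAux s (x :: u) d = orderAux (s + 1) u (d.insert x (PySem.Int.toStr s)) := by
  simp [orderAux, PySem.List.enumerate_cons]

theorem orderAux_append_singleton (s : Int) (u : List Char) (c : Char)
    (d : PySem.Dict Char String) :
    orderAux s (u ++ [c]) d = (orderAux s u d).insert c (PySem.Int.toStr (s + u.length)) := by
  simp [orderAux, PySem.List.enumerate_append, PySem.List.enumerate_cons, List.foldl_append]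

theorem contains_orderAux (u : List Char) (s : Int) (d : PySem.Dict Char String) (c : Char) :
    (orderAux s u d).contains c = (d.contains c || decide (c ∈ u)) := by
  induction u generalizing s d with
  | nil => simp [orderAux_nil]
  | cons x xs ih =>
      rw [orderAux_cons, ih]
      by_cases h : c = x
      · subst h; simp
      · have hb : (c == x) = false := beq_false_of_ne h
        simp [PySem.Dict.contains_insert, hb, h]

theorem getD_orderAux (u : List Char) : ∀ (s : Int) (d : PySem.Dict Char String) (c : Char),
    u.Nodup →
    (orderAux s u d).getD c "" =
      if c ∈ u then PySem.Int.toStr (s + (u.idxOf c : Int)) else d.getD c "" := by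
  induction u with
  | nil => intro s d c _; simp [orderAux_nil]
  | cons x xs ih =>
      intro s d c hu
      rw [orderAux_cons, ih _ _ _ hu.of_cons]
      by_cases h : c = x
      · subst h
        have hnm : c ∉ xs := (List.nodup_cons.mp hu).1
        simp [hnm, PySem.Dict.getD_insert_self, List.idxOf_cons_self]
      · by_cases hm : c ∈ xs
        · have hix : (x :: xs).idxOf c = (xs.idxOf c) + 1 :=
            List.idxOf_cons_ne xs (fun e => h e.symm)
          simp only [hm, if_true, List.mem_cons, h, false_or, hix]
          congr 1
          push_cast
          ring
        · simp [hm, h, PySem.Dict.getD_insert]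

-- idxOf into the updated seen-list is stable for already-seen characters
theorem idxOf_update (seen : List Char) (l : List Char) (c : Char) (hc : c ∈ seen) :
    (PySem.Set.update seen l).idxOf c = seen.idxOf c := by
  rw [PySem.Set.update_eq_append_filter]
  exact List.idxOf_append_of_mem hc

-- one step of A's fold, with the let/if normalized
theorem patStep_eq (m : PySem.Dict Char String) (p : List String) (i : Int) (c : Char) :
    patStep (m, p, i) c
    = if m.contains c then (m, p ++ [m.getD c ""], i)
      else (m.insert c (PySem.Int.toStr i),
            p ++ [(m.insert c (PySem.Int.toStr i)).getD c ""], i + 1) := by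
  by_cases h : m.contains c <;> simp [patStep, h]

-- main invariant: starting A's loop from the state corresponding to a Nodup seen-list
theorem loopA (xs : List Char) : ∀ (seen : List Char), seen.Nodup → ∀ (p : List String),
    (xs.foldl patStep (orderAux 0 seen PySem.Dict.empty, p, (seen.length : Int))).2.1
    = p ++ xs.map (fun c => PySem.Int.toStr (((PySem.Set.update seen xs).idxOf c : Int))) := by
  induction xs with
  | nil => intro seen _ p; simp
  | cons c cs ih =>
      intro seen hseen p
      have hcont : (orderAux 0 seen PySem.Dict.empty).contains c = decide (c ∈ seen) := by
        rw [contains_orderAux]; simp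
      rw [List.foldl_cons, patStep_eq]
      by_cases hc : c ∈ seen
      · -- seen character: dict and counter unchanged
        rw [if_pos (by rw [hcont]; simpa using hc)]
        rw [ih seen hseen]
        have hupd : PySem.Set.update seen (c :: cs) = PySem.Set.update seen cs := by
          rw [PySem.Set.update_cons, PySem.Set.add_of_mem hc]
        have hval : (orderAux 0 seen PySem.Dict.empty).getD c ""
            = PySem.Int.toStr (((PySem.Set.update seen cs).idxOf c : Int)) := by
          rw [getD_orderAux seen _ _ _ hseen, if_pos hc, idxOf_update seen cs c hc]
          simp
        rw [hupd, hval]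
        simp
      · -- new character: insert, bump counter
        rw [if_neg (by rw [hcont]; simp [hc])]
        have hins : (orderAux 0 seen PySem.Dict.empty).insert c
            (PySem.Int.toStr (seen.length : Int)) = orderAux 0 (seen ++ [c]) PySem.Dict.empty := by
          rw [orderAux_append_singleton]; norm_num
        have hnd : (seen ++ [c]).Nodup := by
          rw [List.nodup_append]
          refine ⟨hseen, List.nodup_singleton c, ?_⟩
          intro a ha b hb
          rw [List.mem_singleton] at hb
          subst hb
          exact fun e => hc (e ▸ ha)
        have hlen : ((seen.length : Int) + 1) = ((seen ++ [c]).length : Int) := by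
          simp
        rw [hins, hlen, ih (seen ++ [c]) hnd]
        have hupd : PySem.Set.update seen (c :: cs) = PySem.Set.update (seen ++ [c]) cs := by
          rw [PySem.Set.update_cons, PySem.Set.add_of_not_mem hc]
        have hmem : c ∈ seen ++ [c] := by simp
        have hval : (orderAux 0 (seen ++ [c]) PySem.Dict.empty).getD c ""
            = PySem.Int.toStr (((PySem.Set.update (seen ++ [c]) cs).idxOf c : Int)) := by
          rw [getD_orderAux (seen ++ [c]) _ _ _ hnd, if_pos hmem,
            idxOf_update (seen ++ [c]) cs c hmem]
          simp
        rw [hupd, hval]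
        simp

-- helper: index of c at the end of a list it does not otherwise contain
theorem idxOf_append_self (s : List Char) (c : Char) (hc : c ∉ s) :
    (s ++ [c]).idxOf c = s.length := by
  rw [List.idxOf_append_of_notMem hc, List.idxOf_cons_self]; omega

-- BRIDGE: first-seen rank of c in l = |set(prefix up to first occurrence of c)| - 1
theorem rank_eq_prefix_card (l : List Char) (c : Char) (hc : c ∈ l) :
    ((PySem.Set.ofList (l.take (l.idxOf c + 1))).length : Int) - 1
      = (((PySem.Set.ofList l).idxOf c : Int)) := by
  set k := l.idxOf c with hk
  have hklt : k < l.length := List.idxOf_lt_length_of_mem hc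
  have htake : l.take (k + 1) = l.take k ++ [c] := by
    rw [List.take_add_one]
    have : l[k]? = some c := by
      rw [List.getElem?_eq_getElem hklt]
      exact congrArg some (List.getElem_idxOf hklt)
    simp [this]
  have hnmem : c ∉ l.take k := by
    rw [List.mem_take_iff_idxOf_lt hc]
    omega
  have hnmemS : c ∉ PySem.Set.ofList (l.take k) := by
    rw [PySem.Set.mem_ofList]; exact hnmem
  have hofpre : PySem.Set.ofList (l.take (k + 1))
      = PySem.Set.ofList (l.take k) ++ [c] := by
    rw [htake, PySem.Set.ofList_append_singleton, PySem.Set.add_of_not_mem hnmemS]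
  have hsplit : l = l.take (k + 1) ++ l.drop (k + 1) := (List.take_append_drop _ l).symm
  have hidx : (PySem.Set.ofList l).idxOf c = (PySem.Set.ofList (l.take k)).length := by
    conv_lhs => rw [hsplit]
    rw [PySem.Set.ofList_append, PySem.Set.update_eq_append_filter,
      List.idxOf_append_of_mem (by rw [hofpre]; simp), hofpre,
      idxOf_append_self _ _ hnmemS]
  rw [hofpre, hidx]
  simp

theorem pat_eq_alt (w : String) : pat w = pat_alt w := by
  have hmain := loopA w.toList [] List.nodup_nil []
  simp only [orderAux_nil, List.length_nil, Nat.cast_zero, PySem.Set.update_nil_left,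
    List.nil_append] at hmain
  simp only [pat, pat_alt]
  rw [hmain]
  congr 1
  apply List.map_congr_left
  intro c hc
  rw [rank_eq_prefix_card w.toList c hc]

-- ===== VERDICT (by name: the statement is the Claim_ definition above) =====
theorem pat_spec : Claim_equal_pat := by
  intro w _
  exact pat_eq_alt w
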